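-- pv_equiv track=rewrite | github.com/jemtca/CodingBat | Python/Map-2/word_multiple.py | word_multiple
-- ===== SOURCE A (Python) =====
-- def word_multiple(str):
--     d = {}
--
--     for x in str:
--         if not x in d:
--             d[x] = False
--         else:
--             d[x] = True
--
--     return d
-- ===== SOURCE B (Python) =====
-- def word_multiple(str):
--     counts = {}
--     for x in str:
--         counts[x] = counts.get(x, 0) + 1
--     return {c: n > 1 for c, n in counts.items()}
-- ===== Notes on version B (the rewrite author's own statement) =====
-- stated objective: idiomatic
-- what changed: B replaces A's in-place flag-flipping dict (insert False on first sight, overwrite with True on repeats) with a count-then-threshold decomposition: one pass tallies character frequencies, then a dict comprehension maps each count to count > 1.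
import Mathlib
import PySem

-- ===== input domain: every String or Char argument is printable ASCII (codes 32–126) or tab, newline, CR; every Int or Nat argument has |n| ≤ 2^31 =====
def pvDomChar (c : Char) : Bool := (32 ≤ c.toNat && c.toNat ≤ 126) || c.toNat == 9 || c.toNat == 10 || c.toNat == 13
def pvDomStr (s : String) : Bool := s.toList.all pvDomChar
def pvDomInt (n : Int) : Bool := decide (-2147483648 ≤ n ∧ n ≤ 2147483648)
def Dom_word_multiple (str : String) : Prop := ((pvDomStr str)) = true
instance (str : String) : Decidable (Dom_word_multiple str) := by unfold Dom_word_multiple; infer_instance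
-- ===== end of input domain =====

-- B replaces A's in-place flag-flipping dict with a count-then-threshold pass (idiomatic decomposition; same cost).


-- ===== PORT A =====
-- A: one pass; first sight of a char inserts False, any repeat overwrites with True.
def word_multiple (str : String) : List (String × Bool) :=
  (str.toList.foldl (fun d x =>
      if d.contains (String.singleton x) = false then
        d.insert (String.singleton x) false
      else
        d.insert (String.singleton x) true)
    (PySem.Dict.empty : PySem.Dict String Bool)).items

-- ===== PORT B =====
-- B: tally frequencies in one pass, then map each count to count > 1.
def word_multiple_alt (str : String) : List (String × Bool) :=
  let counts := str.toList.foldl (fun d x =>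
      d.insert (String.singleton x) (d.getD (String.singleton x) 0 + 1))
    (PySem.Dict.empty : PySem.Dict String Int)
  counts.items.map (fun p => (p.1, decide (1 < p.2)))

-- ===== PRECONDITION & SPEC =====
def Spec_word_multiple (str : String) (out : List (String × Bool)) : Prop := out = word_multiple_alt str
instance (str : String) (out : List (String × Bool)) : Decidable (Spec_word_multiple str out) := by unfold Spec_word_multiple; infer_instance

-- ===== CLAIM (what is proved, stated in full; the proofs are below) =====
def Claim_equal_word_multiple : Prop := ∀ (str : String), Dom_word_multiple str → Spec_word_multiple str (word_multiple str)

-- ===== LEMMAS AND PROOFS =====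

-- Abstraction: the flag dict A maintains is the count dict with every value thresholded at > 1.
def pvValMap (d : PySem.Dict String Int) : PySem.Dict String Bool :=
  PySem.Dict.mk (d.items.map (fun p => (p.1, decide (1 < p.2))))

theorem pvDict_eq_of_items {κ ν : Type} (a b : PySem.Dict κ ν)
    (h : a.items = b.items) : a = b := by
  cases a; cases b; cases h; rfl

theorem pvContains_valMap (d : PySem.Dict String Int) (k : String) :
    (pvValMap d).contains k = d.contains k := by
  simp [pvValMap, PySem.Dict.contains, List.any_map, Function.comp_def]

theorem pvFlag_eq_valMap_count (l : List Char) :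
    ∀ (d : PySem.Dict String Int), (∀ p ∈ d.items, 1 ≤ p.2) →
    l.foldl (fun e x =>
        if e.contains (String.singleton x) = false then
          e.insert (String.singleton x) false
        else
          e.insert (String.singleton x) true) (pvValMap d)
      = pvValMap (l.foldl (fun d x =>
          d.insert (String.singleton x) (d.getD (String.singleton x) 0 + 1)) d) := by
  induction l with
  | nil => intro d _; rfl
  | cons x l ih =>
    intro d hinv
    have hstep :
        (if (pvValMap d).contains (String.singleton x) = false then
           (pvValMap d).insert (String.singleton x) false
         else (pvValMap d).insert (String.singleton x) true)
        = pvValMap (d.insert (String.singleton x)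
            (d.getD (String.singleton x) 0 + 1)) := by
      apply pvDict_eq_of_items
      by_cases h : d.contains (String.singleton x) = true
      · -- repeat: the stored count is ≥ 1, so the new count is > 1
        obtain ⟨v, hv⟩ : ∃ v, d.get? (String.singleton x) = some v :=
          Option.isSome_iff_exists.mp
            (by rw [← PySem.Dict.contains_eq_isSome_get?]; exact h)
        have hv1 : (1 : Int) ≤ v := hinv _ (PySem.Dict.mem_items_of_get?_eq_some d hv)
        have hg : d.getD (String.singleton x) 0 = v :=
          PySem.Dict.getD_of_get?_eq_some d 0 hv
        have hic : (pvValMap d).contains (String.singleton x) = true := by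
          rw [pvContains_valMap]; exact h
        rw [pvContains_valMap, h, if_neg (by simp)]
        show ((pvValMap d).insert (String.singleton x) true).items
          = ((d.insert (String.singleton x) (d.getD (String.singleton x) 0 + 1)).items).map
              (fun p => (p.1, decide (1 < p.2)))
        rw [PySem.Dict.items_insert_of_contains _ _ hic,
          PySem.Dict.items_insert_of_contains _ _ h]
        show ((d.items.map (fun p => (p.1, decide (1 < p.2)))).map _) = _
        rw [List.map_map, List.map_map]
        apply List.map_congr_left
        intro p _
        have hv1' : (1 : Int) ≤ d.getD (String.singleton x) 0 := hg ▸ hv1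
        simp only [Function.comp_apply]
        by_cases hp : (p.1 == String.singleton x) = true
        · rw [if_pos hp, if_pos hp]
          have : decide (1 < d.getD (String.singleton x) 0 + 1) = true := by
            simp only [decide_eq_true_eq]; omega
          rw [this]
        · rw [if_neg hp, if_neg hp]
      · have h' : d.contains (String.singleton x) = false := by simpa using h
        have hic : (pvValMap d).contains (String.singleton x) = false := by
          rw [pvContains_valMap]; exact h'
        rw [pvContains_valMap, h', if_pos rfl]
        show ((pvValMap d).insert (String.singleton x) false).items
          = ((d.insert (String.singleton x) (d.getD (String.singleton x) 0 + 1)).items).map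
              (fun p => (p.1, decide (1 < p.2)))
        rw [PySem.Dict.items_insert_of_not_contains _ _ hic,
          PySem.Dict.items_insert_of_not_contains _ _ h']
        simp [pvValMap, PySem.Dict.getD_of_not_contains _ _ h']
    rw [List.foldl_cons, List.foldl_cons, hstep]
    apply ih
    intro p hp
    rcases (PySem.Dict.mem_items_insert d _ _ p).mp hp with h | ⟨hmem, _⟩
    · subst h
      by_cases h : d.contains (String.singleton x) = true
      · obtain ⟨v, hv⟩ : ∃ v, d.get? (String.singleton x) = some v :=
          Option.isSome_iff_exists.mp
            (by rw [← PySem.Dict.contains_eq_isSome_get?]; exact h)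
        have := hinv _ (PySem.Dict.mem_items_of_get?_eq_some d hv)
        rw [PySem.Dict.getD_of_get?_eq_some d 0 hv]; omega
      · rw [PySem.Dict.getD_of_not_contains _ _ (by simpa using h)]; omega
    · exact hinv _ hmem

-- ===== VERDICT (by name: the statement is the Claim_ definition above) =====
theorem word_multiple_spec : Claim_equal_word_multiple := by
  intro str _
  unfold Spec_word_multiple word_multiple word_multiple_alt
  have h0 : (PySem.Dict.empty : PySem.Dict String Bool) = pvValMap PySem.Dict.empty := rfl
  rw [h0, pvFlag_eq_valMap_count str.toList PySem.Dict.empty (by simp [PySem.Dict.empty])]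
  rfl
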